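-- pv_equiv track=rewrite | github.com/shikhar1verma/code-architecture-mapper | backend/graphing/mermaid.py | _group_internal_modules
-- ===== SOURCE A (Python) =====
-- from typing import List, Dict, Tuple, Optional, Any
-- from collections import defaultdict
--
-- def _group_internal_modules(modules: List[str]) -> Dict[str, List[str]]:
--     """Group internal modules by logical components"""
--     groups = defaultdict(list)
--
--     for module in modules:
--         # Determine group based on path
--         parts = module.split('/')
--
--         if len(parts) >= 2:
--             # Use directory structure
--             if parts[0] in ['src', 'app', 'lib']:
--                 group_name = parts[1] if len(parts) > 1 else parts[0]
--             else:
--                 group_name = parts[0]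
--         else:
--             group_name = "Root"
--
--         # Clean group name
--         group_name = group_name.replace('_', ' ').replace('-', ' ').title()
--         groups[group_name].append(module)
--
--     return dict(groups)
-- ===== SOURCE B (Python) =====
-- from typing import List, Dict
--
--
-- def _component_key(module: str) -> str:
--     parts = module.split('/')
--     if len(parts) >= 2:
--         name = parts[1] if parts[0] in ('src', 'app', 'lib') else parts[0]
--     else:
--         name = "Root"
--     return name.replace('_', ' ').replace('-', ' ').title()
--
--
-- def _group_internal_modules(modules: List[str]) -> Dict[str, List[str]]:
--     """Group internal modules by logical components"""
--     keyed = [(m, _component_key(m)) for m in modules]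
--     return {k: [m for m, km in keyed if km == k]
--             for k in dict.fromkeys(km for _, km in keyed)}
-- ===== Notes on version B (the rewrite author's own statement) =====
-- stated objective: simpler
-- what changed: B replaces A's incremental defaultdict-append loop by a declarative group-by: it computes each module's component key once, dedups the keys in first-occurrence order, and builds each group by filtering the keyed list, all as comprehensions.
import Mathlib
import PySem

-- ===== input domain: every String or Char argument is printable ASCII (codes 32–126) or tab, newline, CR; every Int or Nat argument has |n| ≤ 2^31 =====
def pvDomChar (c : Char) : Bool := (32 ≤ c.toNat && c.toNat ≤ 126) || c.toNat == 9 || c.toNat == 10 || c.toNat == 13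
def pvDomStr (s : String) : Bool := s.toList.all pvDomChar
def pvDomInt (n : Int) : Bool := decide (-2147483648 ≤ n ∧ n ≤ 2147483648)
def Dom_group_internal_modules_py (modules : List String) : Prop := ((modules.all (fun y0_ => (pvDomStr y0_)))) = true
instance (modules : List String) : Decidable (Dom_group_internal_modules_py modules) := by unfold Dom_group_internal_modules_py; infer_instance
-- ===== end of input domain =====

-- B groups by a key helper: dedup the keys in first-occurrence order, then filter per key,
-- instead of A's incremental defaultdict-append loop; objective: simpler (same results).

-- ===== PORT A =====
-- str.title(), ported by hand (PySem has no title): a letter is uppercased after a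
-- non-letter and lowercased after a letter; exact for the ASCII domain (no other
-- cased/titlecased characters exist there).
def pyTitleAux : Bool → List Char → List Char
  | _, [] => []
  | prevCased, c :: cs =>
      if PySem.Chars.isalpha c then
        (if prevCased then PySem.Chars.lowerChar c else PySem.Chars.upperChar c) :: pyTitleAux true cs
      else c :: pyTitleAux false cs

def pyTitle (s : String) : String := String.ofList (pyTitleAux false s.toList)

-- literal transliteration of A: one pass, groups[group_name].append(module) on a defaultdict(list).
-- parts[0]/parts[1] never raise (split always yields a piece; parts[1] only read when len ≥ 2),
-- so (pyGet? …).getD "" is exact here.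
def group_internal_modules_py (modules : List String) : List (String × List String) :=
  (modules.foldl (fun groups module =>
      let parts := (PySem.Str.split? module "/").getD []
      let group_name :=
        if parts.length ≥ 2 then
          if (PySem.List.pyGet? parts 0).getD "" ∈ ["src", "app", "lib"] then
            (if parts.length > 1 then (PySem.List.pyGet? parts 1).getD "" else (PySem.List.pyGet? parts 0).getD "")
          else (PySem.List.pyGet? parts 0).getD ""
        else "Root"
      let group_name := pyTitle (PySem.Str.replace (PySem.Str.replace group_name "_" " ") "-" " ")
      groups.modify group_name [] (· ++ [module]))
    PySem.Dict.empty).items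

-- ===== PORT B =====
def pvComponentKey (module : String) : String :=
  let parts := (PySem.Str.split? module "/").getD []
  let name :=
    if parts.length ≥ 2 then
      if (PySem.List.pyGet? parts 0).getD "" ∈ ["src", "app", "lib"]
      then (PySem.List.pyGet? parts 1).getD "" else (PySem.List.pyGet? parts 0).getD ""
    else "Root"
  pyTitle (PySem.Str.replace (PySem.Str.replace name "_" " ") "-" " ")

def group_internal_modules_py_alt (modules : List String) : List (String × List String) :=
  let keyed := modules.map (fun m => (m, pvComponentKey m))
  (PySem.List.dedup (keyed.map (·.2))).map
    (fun k => (k, (keyed.filter (fun p => p.2 == k)).map (·.1)))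

-- ===== PRECONDITION & SPEC =====
def Spec_group_internal_modules_py (modules : List String) (out : List (String × List String)) : Prop := out = group_internal_modules_py_alt modules
instance (modules : List String) (out : List (String × List String)) : Decidable (Spec_group_internal_modules_py modules out) := by unfold Spec_group_internal_modules_py; infer_instance

-- ===== CLAIM (what is proved, stated in full; the proofs are below) =====
def Claim_equal_group_internal_modules_py : Prop := ∀ (modules : List String), Dom_group_internal_modules_py modules → Spec_group_internal_modules_py modules (group_internal_modules_py modules)

-- ===== LEMMAS AND PROOFS =====

-- A's inline group-name computation is pvComponentKey (A's inner 'len > 1' test is redundant under 'len ≥ 2').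
theorem pvKeyA_eq (module : String) :
    (let parts := (PySem.Str.split? module "/").getD []
     let group_name :=
       if parts.length ≥ 2 then
         if (PySem.List.pyGet? parts 0).getD "" ∈ ["src", "app", "lib"] then
           (if parts.length > 1 then (PySem.List.pyGet? parts 1).getD "" else (PySem.List.pyGet? parts 0).getD "")
         else (PySem.List.pyGet? parts 0).getD ""
       else "Root"
     pyTitle (PySem.Str.replace (PySem.Str.replace group_name "_" " ") "-" " "))
    = pvComponentKey module := by
  unfold pvComponentKey
  generalize (PySem.Str.split? module "/").getD [] = parts
  generalize (PySem.List.pyGet? parts 0).getD "" = a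
  generalize (PySem.List.pyGet? parts 1).getD "" = b
  rcases Nat.lt_or_ge parts.length 2 with h | h
  · simp only [Nat.not_le.mpr h, if_false]
  · have h1 : 1 < parts.length := by omega
    simp only [ge_iff_le, h, if_pos, gt_iff_lt, h1]

theorem group_internal_modules_py_eq (modules : List String) :
    group_internal_modules_py modules
      = (PySem.List.dedup (modules.map pvComponentKey)).map
          (fun k => (k, modules.filter (fun m => pvComponentKey m == k))) := by
  unfold group_internal_modules_py
  have hfun : (fun (groups : PySem.Dict String (List String)) module =>
      let parts := (PySem.Str.split? module "/").getD []
      let group_name :=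
        if parts.length ≥ 2 then
          if (PySem.List.pyGet? parts 0).getD "" ∈ ["src", "app", "lib"] then
            (if parts.length > 1 then (PySem.List.pyGet? parts 1).getD "" else (PySem.List.pyGet? parts 0).getD "")
          else (PySem.List.pyGet? parts 0).getD ""
        else "Root"
      let group_name := pyTitle (PySem.Str.replace (PySem.Str.replace group_name "_" " ") "-" " ")
      groups.modify group_name [] (· ++ [module]))
      = (fun groups module => groups.modify (pvComponentKey module) [] (· ++ [module])) := by
    funext groups module
    simp only [← pvKeyA_eq module]
  rw [hfun]
  have hnd : (modules.foldl (fun groups module =>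
      groups.modify (pvComponentKey module) [] (· ++ [module])) PySem.Dict.empty).keys.Nodup :=
    PySem.Dict.nodup_keys_foldl_modify_key modules pvComponentKey [] (fun _ m v => v ++ [m])
      PySem.Dict.empty (by simp)
  rw [PySem.Dict.items_eq_map_keys _ hnd []]
  have hkeys : (modules.foldl (fun groups module =>
      groups.modify (pvComponentKey module) [] (· ++ [module])) PySem.Dict.empty).keys
      = PySem.List.dedup (modules.map pvComponentKey) := by
    rw [PySem.Dict.keys_foldl_modify_key]
    simp [PySem.Set.update_nil_left]
  rw [hkeys]
  apply List.map_congr_left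
  intro k _
  have hfold : (modules.foldl (fun groups module =>
      groups.modify (pvComponentKey module) [] (· ++ [module])) PySem.Dict.empty)
      = ((modules.map (fun m => (pvComponentKey m, m))).foldl
          (fun d p => d.modify p.1 [] (· ++ [p.2])) PySem.Dict.empty) := by
    rw [List.foldl_map]
  rw [hfold, PySem.Dict.getD_foldl_modify_append]
  simp [List.filter_map, List.map_map, Function.comp_def]

theorem group_internal_modules_py_alt_eq (modules : List String) :
    group_internal_modules_py_alt modules
      = (PySem.List.dedup (modules.map pvComponentKey)).map
          (fun k => (k, modules.filter (fun m => pvComponentKey m == k))) := by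
  unfold group_internal_modules_py_alt
  simp [List.map_map, Function.comp_def, List.filter_map]

-- ===== VERDICT (by name: the statement is the Claim_ definition above) =====
theorem group_internal_modules_py_spec : Claim_equal_group_internal_modules_py := by
  intro modules _
  unfold Spec_group_internal_modules_py
  rw [group_internal_modules_py_eq, group_internal_modules_py_alt_eq]
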